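-- pv_equiv track=rewrite | github.com/sifaka-ai/sifaka | sifaka_attempt/di/utils/graph.py | find_cycle_containing
-- ===== SOURCE A (Python) =====
-- from typing import Dict, List, Optional, Set, Tuple
--
-- def find_cycle_containing(graph: Dict[str, List[str]], name: str) -> Optional[List[str]]:
--     """
--     Find a cycle containing the given dependency name.
--
--     Args:
--         graph: Dependency graph
--         name: Dependency name to find in a cycle
--
--     Returns:
--         Cycle containing the dependency, or None if no cycle is found
--     """
--     if name not in graph:
--         return None
--
--     visited = set()
--     path = []
--     path_set = set()
--
--     def dfs(node: str) -> Optional[List[str]]: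
--         if node in path_set:
--             # Found a cycle
--             cycle_start = path.index(node)
--             cycle = path[cycle_start:] + [node]
--             if name in cycle:
--                 return cycle
--             return None
--
--         if node in visited:
--             return None
--
--         visited.add(node)
--         path.append(node)
--         path_set.add(node)
--
--         for neighbor in graph.get(node, []):
--             cycle = dfs(neighbor)
--             if cycle:
--                 return cycle
--
--         path.pop()
--         path_set.remove(node)
--         return None
--
--     return dfs(name)
-- ===== SOURCE B (Python) =====
-- from typing import Dict, List, Optional
--
-- def find_cycle_containing(graph: Dict[str, List[str]], name: str) -> Optional[List[str]]:
--     """Iterative DFS with an explicit stack of neighbor frames. A cycle containing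
--     `name` reachable from `name` is exactly a path from `name` back to `name`, so
--     only back-edges to the root are checked; no path_set / path.index / slice or
--     recursion is needed."""
--     if name not in graph:
--         return None
--     visited = {name}
--     path = [name]
--     stack = [list(graph.get(name, []))]  # neighbors still to try, per frame
--     while stack:
--         frame = stack[-1]
--         if not frame:
--             stack.pop()
--             path.pop()
--             continue
--         nb = frame.pop(0)
--         if nb == name:
--             return path + [name]
--         if nb in visited:
--             continue
--         visited.add(nb)
--         path.append(nb)
--         stack.append(list(graph.get(nb, [])))
--     return None
-- ===== Notes on version B (the rewrite author's own statement) =====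
-- stated objective: alternative
-- what changed: B replaces A's recursive DFS with path_set/path.index/slice bookkeeping by an iterative DFS over an explicit stack of remaining-neighbor frames that only checks back-edges to the root, since a cycle containing `name` found by DFS from `name` is exactly a path from `name` back to `name`.
import Mathlib
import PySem

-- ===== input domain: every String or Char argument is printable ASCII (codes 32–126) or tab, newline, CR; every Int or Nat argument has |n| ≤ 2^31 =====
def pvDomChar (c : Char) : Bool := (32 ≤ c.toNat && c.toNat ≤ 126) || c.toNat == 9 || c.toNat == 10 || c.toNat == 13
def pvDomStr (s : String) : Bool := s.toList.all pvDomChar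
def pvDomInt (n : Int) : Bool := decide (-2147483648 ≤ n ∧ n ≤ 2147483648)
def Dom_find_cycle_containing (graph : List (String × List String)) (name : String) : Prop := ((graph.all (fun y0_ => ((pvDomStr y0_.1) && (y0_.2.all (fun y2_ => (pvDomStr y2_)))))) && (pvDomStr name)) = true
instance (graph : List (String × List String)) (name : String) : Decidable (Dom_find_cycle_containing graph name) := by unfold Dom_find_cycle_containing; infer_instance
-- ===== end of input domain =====

-- B replaces A's recursive DFS (with its path_set/path.index/slice bookkeeping) by an
-- iterative DFS over an explicit stack of neighbor frames that only checks back-edges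
-- to the root `name` (objective: alternative). Return-value equivalence only; neither
-- implementation mutates its arguments.

-- ===== PORT A =====
-- Fuel bound: the recursion depth of dfs is at most |path_set| + 1 ≤ (1 + total number of
-- neighbour occurrences) + 1, so this fuel is never exhausted; fuel is a totality guard only.
def pvFuel (graph : List (String × List String)) : Nat :=
  graph.length + (graph.map (fun p => p.2.length)).sum + 2

-- the `for neighbor in …` loop of A's dfs (`if cycle:` is Python truthiness: None and [] both fall through)
def pvLoopA (dfs : String → List String → List String → List String → Option (List String) × List String) :
    List String → List String → List String → List String → Option (List String) × List String
  | [], visited, _, _ => (none, visited)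
  | nb :: rest, visited, path, path_set =>
    match dfs nb visited path path_set with
    | (some c, v) => if c = [] then pvLoopA dfs rest v path path_set else (some c, v)
    | (none, v) => pvLoopA dfs rest v path path_set

-- A's dfs: `visited` is threaded through (the Python set is shared and only grows); `path` and
-- `path_set` are restored by the final pop/remove before every None-return, so they are plain
-- call arguments here and nothing has to be returned for them.
def pvDfsA (g : PySem.Dict String (List String)) (name : String) :
    Nat → String → List String → List String → List String → Option (List String) × List String
  | 0 => fun _ visited _ _ => (none, visited)   -- fuel guard only, never reached (see pvFuel)
  | fuel + 1 => fun node visited path path_set =>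
      if node ∈ path_set then
        match PySem.List.index? path node with   -- path.index(node); `none` = ValueError, unreachable (node ∈ path_set → node ∈ path)
        | some cycle_start =>
            let cycle := PySem.List.slice path (some (cycle_start : Int)) none ++ [node]
            (if name ∈ cycle then some cycle else none, visited)
        | none => (none, visited)
      else if node ∈ visited then (none, visited)
      else
        pvLoopA (pvDfsA g name fuel) (g.getD node []) (PySem.Set.add visited node)
          (path ++ [node]) (PySem.Set.add path_set node)

def find_cycle_containing (graph : List (String × List String)) (name : String) : Option (List String) :=
  let g := PySem.Dict.mk graph
  if g.contains name then (pvDfsA g name (pvFuel graph) name PySem.Set.empty [] PySem.Set.empty).1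
  else none

-- ===== PORT B =====
-- Fuel bound: every loop iteration strictly decreases the measure
-- 2·(total frame lengths) + (stack height) + 2·Σ_{keys k ∉ visited} (|graph[k]|+1), whose
-- initial value is at most this number, so the fuel is a totality guard only (see pvSim/pvM).
def pvStepFuel (graph : List (String × List String)) : Nat :=
  4 * (graph.map (fun p => p.2.length)).sum + 2 * graph.length + 2

-- B's `while stack:` loop. State: stack of per-node remaining-neighbor frames, the current
-- path (roots of the active frames), and the visited set.  frame.pop(0) = taking the head.
def pvStep (g : PySem.Dict String (List String)) (name : String) :
    Nat → List (List String) → List String → List String → Option (List String)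
  | 0, _, _, _ => none                          -- fuel guard only, never reached (see pvStepFuel)
  | _ + 1, [], _, _ => none                     -- while stack: … exits, return None
  | fuel + 1, [] :: rest, path, visited =>      -- empty frame: stack.pop(); path.pop()
      pvStep g name fuel rest path.dropLast visited
  | fuel + 1, (nb :: frest) :: rest, path, visited =>
      if nb = name then some (path ++ [name])   -- back-edge to the root: the cycle
      else if nb ∈ visited then pvStep g name fuel (frest :: rest) path visited
      else pvStep g name fuel (g.getD nb [] :: frest :: rest) (path ++ [nb])
             (PySem.Set.add visited nb)

def find_cycle_containing_alt (graph : List (String × List String)) (name : String) : Option (List String) :=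
  let g := PySem.Dict.mk graph
  if g.contains name then
    pvStep g name (pvStepFuel graph) [g.getD name []] [name] (PySem.Set.ofList [name])
  else none

-- ===== PRECONDITION & SPEC =====
def Spec_find_cycle_containing (graph : List (String × List String)) (name : String) (out : Option (List String)) : Prop := out = find_cycle_containing_alt graph name
instance (graph : List (String × List String)) (name : String) (out : Option (List String)) : Decidable (Spec_find_cycle_containing graph name out) := by unfold Spec_find_cycle_containing; infer_instance

-- ===== CLAIM (what is proved, stated in full; the proofs are below) =====
def Claim_equal_find_cycle_containing : Prop := ∀ (graph : List (String × List String)) (name : String), Dom_find_cycle_containing graph name → Spec_find_cycle_containing graph name (find_cycle_containing graph name)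

-- ===== LEMMAS AND PROOFS =====

-- Proof plan: A's recursion is first related to an intermediate recursive function pvDfsH
-- (the root-back-edge DFS, lemma pvDfs_sim), and pvDfsH is then related to B's stack
-- machine pvStep through pvRunH, a stack of pvDfsH-frames (lemma pvSim).

-- the neighbor loop of the intermediate DFS
def pvLoopH (dfs : String → List String → List String → Option (List String) × List String) :
    List String → List String → List String → Option (List String) × List String
  | [], visited, _ => (none, visited)
  | nb :: rest, visited, path =>
    match dfs nb visited path with
    | (some c, v) => (some c, v)
    | (none, v) => pvLoopH dfs rest v path

-- intermediate recursive DFS: cycle iff a path from `name` back to `name`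
def pvDfsH (g : PySem.Dict String (List String)) (name : String) :
    Nat → String → List String → List String → Option (List String) × List String
  | 0 => fun _ visited _ => (none, visited)
  | fuel + 1 => fun node visited path =>
      if node = name ∧ path ≠ [] then (some (path ++ [name]), visited)
      else if node ∈ visited then (none, visited)
      else
        pvLoopH (pvDfsH g name fuel) (g.getD node []) (PySem.Set.add visited node) (path ++ [node])

-- running a stack of pvDfsH frames, each with its own remaining fuel
def pvRunH (g : PySem.Dict String (List String)) (name : String) :
    List (Nat × List String) → List String → List String → Option (List String)
  | [], _, _ => none
  | (a, frame) :: rest, path, visited =>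
    match pvLoopH (pvDfsH g name a) frame visited path with
    | (some c, _) => some c
    | (none, v') => pvRunH g name rest path.dropLast v'

-- potential of the not-yet-visited part of the graph
def pvPhiL (items : List (String × List String)) (v : List String) : Nat :=
  ((items.filter (fun p => decide (p.1 ∉ v))).map (fun p => p.2.length + 1)).sum

-- the strictly decreasing measure of pvStep's loop
def pvM (graph : List (String × List String)) (stack : List (List String)) (v : List String) : Nat :=
  2 * (stack.map List.length).sum + stack.length + 2 * pvPhiL graph v

-- fuel layout of a pvRunH stack: the frame at depth d carries fuel F - d
def pvFuelsOK (F : Nat) : List (Nat × List String) → Nat → Prop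
  | [], _ => True
  | (a, _) :: rest, d => a + d = F ∧ pvFuelsOK F rest (d - 1)

-- all nodes that can ever become visited
def pvU (graph : List (String × List String)) (name : String) : List String :=
  name :: graph.flatMap (fun p => p.2)

-- ---------- A = H (previous half) ----------

-- Invariant relating A's state to H's: path_set has exactly path's elements, every one of them is
-- visited, and name can occur in path only as its head (it is the DFS root).
def pvInv (name : String) (visited path path_set : List String) : Prop :=
  (∀ x, x ∈ path_set ↔ x ∈ path) ∧
  (∀ x ∈ path_set, x ∈ visited) ∧
  (path ≠ [] → path.head? = some name) ∧
  name ∉ path.tail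

lemma pvLoopH_mono (dfs : String → List String → List String → Option (List String) × List String)
    (h : ∀ node v path x, x ∈ v → x ∈ (dfs node v path).2) :
    ∀ (l v path : List String) (x : String), x ∈ v → x ∈ (pvLoopH dfs l v path).2 := by
  intro l
  induction l with
  | nil => intro v path x hx; simpa [pvLoopH] using hx
  | cons nb rest ih =>
    intro v path x hx
    simp only [pvLoopH]
    rcases hr : dfs nb v path with ⟨r, v'⟩
    have hv' : x ∈ v' := by simpa [hr] using h nb v path x hx
    cases r with
    | some c => simpa using hv'
    | none => exact ih v' path x hv'

lemma pvDfsH_mono (g : PySem.Dict String (List String)) (name : String) :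
    ∀ (fuel : Nat) (node : String) (v path : List String) (x : String),
      x ∈ v → x ∈ (pvDfsH g name fuel node v path).2 := by
  intro fuel
  induction fuel with
  | zero => intro node v path x hx; simpa [pvDfsH] using hx
  | succ fuel ih =>
    intro node v path x hx
    simp only [pvDfsH]
    split_ifs with h1 h2
    · simpa using hx
    · simpa using hx
    · exact pvLoopH_mono _ (fun n v p x hx => ih n v p x hx) _ _ _ x
        (by simp [PySem.Set.mem_add, hx])

lemma pvLoopH_ne (dfs : String → List String → List String → Option (List String) × List String)
    (h : ∀ node v path, (dfs node v path).1 ≠ some []) :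
    ∀ (l v path : List String), (pvLoopH dfs l v path).1 ≠ some [] := by
  intro l
  induction l with
  | nil => intro v path; simp [pvLoopH]
  | cons nb rest ih =>
    intro v path
    simp only [pvLoopH]
    rcases hr : dfs nb v path with ⟨r, v'⟩
    cases r with
    | some c =>
      have := h nb v path; rw [hr] at this
      simpa using this
    | none => exact ih v' path

lemma pvDfsH_ne (g : PySem.Dict String (List String)) (name : String) :
    ∀ (fuel : Nat) (node : String) (v path : List String),
      (pvDfsH g name fuel node v path).1 ≠ some [] := by
  intro fuel
  induction fuel with
  | zero => intro node v path; simp [pvDfsH]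
  | succ fuel ih =>
    intro node v path
    simp only [pvDfsH]
    split_ifs with h1 h2
    · simp
    · simp
    · exact pvLoopH_ne _ (fun n v p => ih n v p) _ _ _

lemma pvLoop_sim (name : String)
    (dfsA : String → List String → List String → List String → Option (List String) × List String)
    (dfsB : String → List String → List String → Option (List String) × List String)
    (hsim : ∀ node v path ps, pvInv name v path ps → (path = [] → node = name) →
      dfsA node v path ps = dfsB node v path)
    (hmono : ∀ node v path x, x ∈ v → x ∈ (dfsB node v path).2)
    (hne : ∀ node v path, (dfsB node v path).1 ≠ some []) :
    ∀ (l v path ps : List String), pvInv name v path ps → path ≠ [] →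
      pvLoopA dfsA l v path ps = pvLoopH dfsB l v path := by
  intro l
  induction l with
  | nil => intro v path ps _ _; simp [pvLoopA, pvLoopH]
  | cons nb rest ih =>
    intro v path ps hinv hpath
    simp only [pvLoopA, pvLoopH]
    rw [hsim nb v path ps hinv (fun h => absurd h hpath)]
    rcases hr : dfsB nb v path with ⟨r, v'⟩
    cases r with
    | some c =>
      have hc : c ≠ [] := by
        have := hne nb v path; rw [hr] at this; simpa using this
      simp [hc]
    | none =>
      have hinv' : pvInv name v' path ps := by
        obtain ⟨h1, h2, h3, h4⟩ := hinv
        refine ⟨h1, fun x hx => ?_, h3, h4⟩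
        have := hmono nb v path x (h2 x hx)
        rw [hr] at this; exact this
      exact ih v' path ps hinv' hpath

lemma pvDfs_sim (g : PySem.Dict String (List String)) (name : String) :
    ∀ (fuel : Nat) (node : String) (v path ps : List String),
      pvInv name v path ps → (path = [] → node = name) →
      pvDfsA g name fuel node v path ps = pvDfsH g name fuel node v path := by
  intro fuel
  induction fuel with
  | zero => intro node v path ps _ _; rfl
  | succ fuel ih =>
    intro node v path ps hinv hroot
    obtain ⟨h1, h2, h3, h4⟩ := hinv
    simp only [pvDfsA, pvDfsH]
    by_cases hin : node ∈ ps
    · rw [if_pos hin]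
      have hpm : node ∈ path := (h1 node).1 hin
      have hpne : path ≠ [] := by rintro rfl; simp at hpm
      obtain ⟨i, hi⟩ := Option.isSome_iff_exists.1 ((PySem.List.index?_isSome_iff path node).2 hpm)
      rw [hi]
      obtain ⟨pre, suf, hdec, hlen, hpre⟩ := (PySem.List.index?_eq_some_iff path node i).1 hi
      have hdrop : PySem.List.slice path (some (i : Int)) none = node :: suf := by
        rw [PySem.List.slice_from_natCast, hdec, ← hlen, List.drop_left]
      by_cases hn : node = name
      · subst hn
        have hpre0 : pre = [] := by
          cases pre with
          | nil => rfl
          | cons a t =>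
            have ha : a = node := by
              have := h3 hpne
              rw [hdec] at this
              simpa using this
            exact absurd (ha ▸ List.mem_cons_self) hpre
        subst hpre0
        simp only [List.nil_append] at hdec
        dsimp only
        rw [hdrop, ← hdec]
        simp [hpne]
      · -- node ≠ name : A returns none, H skips via visited
        have hns : name ∉ suf := by
          intro hmem
          have hh := h3 hpne
          cases pre with
          | nil =>
            rw [hdec] at hh; simp at hh; exact hn hh
          | cons a t =>
            have : name ∈ path.tail := by
              rw [hdec]; simp [hmem]
            exact h4 this
        dsimp only
        rw [hdrop]
        have hnc : name ∉ node :: suf ++ [node] := by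
          have hnn : name ≠ node := fun h => hn h.symm
          simp [hnn, hns]
        rw [if_neg hnc, if_neg (by rintro ⟨rfl, _⟩; exact hn rfl), if_pos (h2 node hin)]
    · rw [if_neg hin]
      have hbcond : ¬(node = name ∧ path ≠ []) := by
        rintro ⟨rfl, hne⟩
        have hh := h3 hne
        have : node ∈ path := by
          cases path with
          | nil => exact absurd rfl hne
          | cons a t => simp at hh; simp [hh]
        exact hin ((h1 node).2 this)
      rw [if_neg hbcond]
      by_cases hv : node ∈ v
      · rw [if_pos hv, if_pos hv]
      · rw [if_neg hv, if_neg hv]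
        refine pvLoop_sim name _ _ (fun n v' p ps' hi' hr' => ih n v' p ps' hi' hr')
          (fun n v' p x hx => pvDfsH_mono g name fuel n v' p x hx)
          (fun n v' p => pvDfsH_ne g name fuel n v' p)
          _ _ _ _ ⟨?_, ?_, ?_, ?_⟩ (by simp)
        · intro x
          simp only [PySem.Set.mem_add, List.mem_append, List.mem_singleton, h1 x]
        · intro x hx
          rcases (PySem.Set.mem_add ps node x).1 hx with h | h
          · exact (PySem.Set.mem_add v node x).2 (Or.inl (h2 x h))
          · exact (PySem.Set.mem_add v node x).2 (Or.inr h)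
        · intro _
          cases path with
          | nil => simp [hroot rfl]
          | cons a t => simpa using h3 (by simp)
        · cases path with
          | nil => simp
          | cons a t =>
            have hnn : node ≠ name := by
              intro h; exact hbcond ⟨h, by simp⟩
            simp only [List.cons_append, List.tail_cons, List.mem_append, List.mem_singleton]
            rintro (h | h)
            · exact h4 (by simpa using h)
            · exact hnn h.symm

-- ---------- H = B's stack machine (new half) ----------

lemma pvAdd_eq (v : List String) (nb : String) (h : nb ∉ v) :
    PySem.Set.add v nb = v ++ [nb] := by
  simp [PySem.Set.add, PySem.Set.contains, h]

lemma pvSumSucc (items : List (String × List String)) :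
    (items.map (fun p => p.2.length + 1)).sum
      = (items.map (fun p => p.2.length)).sum + items.length := by
  induction items with
  | nil => simp
  | cons a t ih => simp [ih]; omega

lemma pvPhiL_mono (items : List (String × List String)) (v v' : List String) (h : v ⊆ v') :
    pvPhiL items v' ≤ pvPhiL items v := by
  unfold pvPhiL
  exact ((List.monotone_filter_right items
    (fun p hp => by
      simp only [decide_eq_true_eq] at hp ⊢
      exact fun hm => hp (h hm))).map _).sum_le_sum (by simp)

lemma pvPhiL_cons (a : String × List String) (t : List (String × List String))
    (v : List String) :
    pvPhiL (a :: t) v = (if a.1 ∈ v then 0 else a.2.length + 1) + pvPhiL t v := by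
  by_cases h : a.1 ∈ v <;> simp [pvPhiL, h]

lemma pvPhiL_le (items : List (String × List String)) (v : List String) :
    pvPhiL items v ≤ (items.map (fun p => p.2.length)).sum + items.length := by
  calc pvPhiL items v ≤ (items.map (fun p => p.2.length + 1)).sum :=
        ((List.filter_sublist (l := items)).map _).sum_le_sum (by simp)
    _ = _ := pvSumSucc items

lemma pvPhiL_push_key (items : List (String × List String)) (v : List String)
    (nb : String) (l : List String) (hmem : (nb, l) ∈ items) (hnb : nb ∉ v) :
    pvPhiL items (v ++ [nb]) + (l.length + 1) ≤ pvPhiL items v := by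
  induction items with
  | nil => simp at hmem
  | cons a t ih =>
    rcases List.mem_cons.1 hmem with h | h
    · subst h
      have h3 := pvPhiL_mono t v (v ++ [nb]) (by simp)
      rw [pvPhiL_cons, pvPhiL_cons, if_neg hnb, if_pos (by simp : nb ∈ v ++ [nb])]
      dsimp only
      omega
    · have ht := ih h
      rw [pvPhiL_cons, pvPhiL_cons]
      by_cases ha : a.1 ∈ v ++ [nb]
      · rw [if_pos ha]
        by_cases hav : a.1 ∈ v
        · rw [if_pos hav]; omega
        · rw [if_neg hav]; omega
      · have hav : a.1 ∉ v := fun hm => ha (by simp [hm])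
        rw [if_neg ha, if_neg hav]; omega

lemma pvPhiL_push_nonkey (items : List (String × List String)) (v : List String)
    (nb : String) (hk : ∀ p ∈ items, p.1 ≠ nb) :
    pvPhiL items (v ++ [nb]) = pvPhiL items v := by
  unfold pvPhiL
  congr 1
  apply congrArg
  apply List.filter_congr
  intro p hp
  have := hk p hp
  simp [this]

lemma pvGet?_mem (graph : List (String × List String)) (nb : String) (l : List String)
    (h : (PySem.Dict.mk graph).get? nb = some l) : (nb, l) ∈ graph :=
  PySem.Dict.mem_items_of_get?_eq_some _ h

lemma pvGetD_subset (graph : List (String × List String)) (nb : String) :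
    (PySem.Dict.mk graph).getD nb [] ⊆ graph.flatMap (fun p => p.2) := by
  rw [PySem.Dict.getD_eq_get?_getD]
  rcases h : (PySem.Dict.mk graph).get? nb with _ | l
  · simp
  · intro x hx
    exact List.mem_flatMap.2 ⟨(nb, l), pvGet?_mem graph nb l h, by simpa using hx⟩

lemma pvGetD_len_le (graph : List (String × List String)) (nb : String) :
    ((PySem.Dict.mk graph).getD nb []).length ≤ (graph.map (fun p => p.2.length)).sum := by
  rw [PySem.Dict.getD_eq_get?_getD]
  rcases h : (PySem.Dict.mk graph).get? nb with _ | l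
  · simp
  · have hm := pvGet?_mem graph nb l h
    simpa using List.single_le_sum (l := graph.map (fun p => p.2.length)) (by simp) l.length
      (List.mem_map.2 ⟨(nb, l), hm, rfl⟩)

lemma pvU_len (graph : List (String × List String)) (name : String) :
    (pvU graph name).length = (graph.map (fun p => p.2.length)).sum + 1 := by
  simp [pvU, List.length_flatMap]

lemma pvLen_le (graph : List (String × List String)) (name : String)
    (path v : List String) (h1 : path.Nodup) (h2 : path ⊆ v) (h3 : v.Nodup)
    (h4 : v ⊆ pvU graph name) : path.length ≤ (pvU graph name).length :=
  le_trans (h1.subperm h2).length_le (h3.subperm h4).length_le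

-- pvRunH rewriting rules, one per kind of machine step
lemma pvRunH_pop (g : PySem.Dict String (List String)) (name : String)
    (a : Nat) (rest : List (Nat × List String)) (path v : List String) :
    pvRunH g name ((a, []) :: rest) path v = pvRunH g name rest path.dropLast v := by
  simp [pvRunH, pvLoopH]

lemma pvRunH_found (g : PySem.Dict String (List String)) (name : String)
    (a : Nat) (fr : List String) (rest : List (Nat × List String)) (path v : List String)
    (hp : path ≠ []) :
    pvRunH g name ((a + 1, name :: fr) :: rest) path v = some (path ++ [name]) := by
  simp [pvRunH, pvLoopH, pvDfsH, hp]

lemma pvRunH_skip (g : PySem.Dict String (List String)) (name : String)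
    (a : Nat) (nb : String) (fr : List String) (rest : List (Nat × List String))
    (path v : List String) (hne : nb ≠ name) (hv : nb ∈ v) :
    pvRunH g name ((a + 1, nb :: fr) :: rest) path v
      = pvRunH g name ((a + 1, fr) :: rest) path v := by
  simp [pvRunH, pvLoopH, pvDfsH, hne, hv]

lemma pvRunH_push (g : PySem.Dict String (List String)) (name : String)
    (a : Nat) (nb : String) (fr : List String) (rest : List (Nat × List String))
    (path v : List String) (hne : nb ≠ name) (hv : nb ∉ v) :
    pvRunH g name ((a + 1, nb :: fr) :: rest) path v
      = pvRunH g name ((a, g.getD nb []) :: (a + 1, fr) :: rest) (path ++ [nb])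
          (PySem.Set.add v nb) := by
  rw [pvAdd_eq v nb hv]
  rcases hr : pvLoopH (pvDfsH g name a) (g.getD nb []) (v ++ [nb]) (path ++ [nb])
    with ⟨r, v2⟩
  cases r with
  | some c => simp [pvRunH, pvLoopH, pvDfsH, hne, hv, hr]
  | none => simp [pvRunH, pvLoopH, pvDfsH, hne, hv, hr]

-- the simulation: B's fueled stack machine computes pvRunH of a well-fueled frame stack
lemma pvSim (graph : List (String × List String)) (name : String) :
    ∀ (fB : Nat) (S : List (Nat × List String)) (path v : List String),
      pvM graph (S.map Prod.snd) v ≤ fB →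
      path.length = S.length →
      pvFuelsOK (pvFuel graph) S path.length →
      path.Nodup → path ⊆ v → v.Nodup → v ⊆ pvU graph name →
      (∀ fr ∈ S, fr.2 ⊆ graph.flatMap (fun p => p.2)) →
      pvStep (PySem.Dict.mk graph) name fB (S.map Prod.snd) path v
        = pvRunH (PySem.Dict.mk graph) name S path v := by
  intro fB
  induction fB with
  | zero =>
    intro S path v hM _ _ _ _ _ _ _
    cases S with
    | nil => simp [pvStep, pvRunH]
    | cons s rest => exfalso; simp [pvM] at hM
  | succ fB ih =>
    intro S path v hM hlen hF hnd hpv hvnd hvU hfr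
    cases S with
    | nil => simp [pvStep, pvRunH]
    | cons s rest =>
      rcases s with ⟨a, frame⟩
      -- the top frame's fuel is positive
      have hdle : path.length ≤ (pvU graph name).length := pvLen_le graph name path v hnd hpv hvnd hvU
      have haF : a + path.length = pvFuel graph := hF.1
      have hFbig : (pvU graph name).length + 1 ≤ pvFuel graph := by
        rw [pvU_len]; unfold pvFuel; omega
      obtain ⟨a', rfl⟩ : ∃ a', a = a' + 1 := ⟨a - 1, by omega⟩
      cases frame with
      | nil =>
        rw [pvRunH_pop]
        show pvStep _ name (fB + 1) ([] :: rest.map Prod.snd) path v = _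
        rw [show pvStep (PySem.Dict.mk graph) name (fB + 1) ([] :: rest.map Prod.snd) path v
              = pvStep (PySem.Dict.mk graph) name fB (rest.map Prod.snd) path.dropLast v
            from rfl]
        have hpne : path ≠ [] := by
          intro h; rw [h] at hlen; simp at hlen
        refine ih rest path.dropLast v ?_ ?_ ?_ (hnd.sublist (List.dropLast_sublist path))
          (fun x hx => hpv (List.dropLast_subset path hx)) hvnd hvU
          (fun fr hf => hfr fr (by simp [hf]))
        · simp only [pvM, List.map_cons, List.sum_cons] at hM ⊢; simp at hM ⊢; omega
        · rw [List.length_dropLast]; simp at hlen; omega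
        · rw [List.length_dropLast]; exact hF.2
      | cons nb frest =>
        have hpne : path ≠ [] := by
          intro h; rw [h] at hlen; simp at hlen
        by_cases hnb : nb = name
        · subst hnb
          rw [pvRunH_found _ _ _ _ _ _ _ hpne]
          show pvStep _ nb (fB + 1) ((nb :: frest) :: rest.map Prod.snd) path v = _
          simp [pvStep]
        · by_cases hv : nb ∈ v
          · rw [pvRunH_skip _ _ _ _ _ _ _ _ hnb hv]
            show pvStep _ name (fB + 1) ((nb :: frest) :: rest.map Prod.snd) path v = _
            rw [show pvStep (PySem.Dict.mk graph) name (fB + 1)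
                  ((nb :: frest) :: rest.map Prod.snd) path v
                = pvStep (PySem.Dict.mk graph) name fB (frest :: rest.map Prod.snd) path v
              from by simp [pvStep, hnb, hv]]
            refine ih ((a' + 1, frest) :: rest) path v ?_ (by simpa using hlen)
              ⟨haF, hF.2⟩ hnd hpv hvnd hvU ?_
            · simp only [pvM, List.map_cons, List.sum_cons] at hM ⊢; simp at hM ⊢; omega
            · intro fr hf
              rcases List.mem_cons.1 hf with h | h
              · subst h; exact fun x hx => hfr (a' + 1, nb :: frest) (by simp) (by simp [hx])
              · exact hfr fr (by simp [h])
          · rw [pvRunH_push _ _ _ _ _ _ _ _ hnb hv]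
            show pvStep _ name (fB + 1) ((nb :: frest) :: rest.map Prod.snd) path v = _
            rw [show pvStep (PySem.Dict.mk graph) name (fB + 1)
                  ((nb :: frest) :: rest.map Prod.snd) path v
                = pvStep (PySem.Dict.mk graph) name fB
                    ((PySem.Dict.mk graph).getD nb [] :: frest :: rest.map Prod.snd)
                    (path ++ [nb]) (PySem.Set.add v nb)
              from by simp [pvStep, hnb, hv]]
            have hadd : PySem.Set.add v nb = v ++ [nb] := pvAdd_eq v nb hv
            have hnbU : nb ∈ graph.flatMap (fun p => p.2) :=
              hfr (a' + 1, nb :: frest) (by simp) (by simp)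
            have hnp : nb ∉ path := fun h => hv (hpv h)
            refine ih ((a', (PySem.Dict.mk graph).getD nb []) :: (a' + 1, frest) :: rest)
              (path ++ [nb]) (PySem.Set.add v nb) ?_ (by simp at hlen ⊢; omega)
              ⟨by simp; omega, by simp; exact ⟨haF, hF.2⟩⟩
              (by simp [List.nodup_append, hnd]; exact fun a ha h => hnp (h ▸ ha))
              (by rw [hadd]; exact List.append_subset.2
                    ⟨fun x hx => by simp [hpv hx], by simp⟩)
              (by rw [hadd]; simp [List.nodup_append, hvnd]; exact fun a ha h => hv (h ▸ ha))
              (by rw [hadd]; exact List.append_subset.2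
                    ⟨hvU, by simp [pvU, hnbU]⟩) ?_
            · -- the measure decreases
              rw [hadd]
              rcases hg : (PySem.Dict.mk graph).get? nb with _ | l
              · -- nb is not a key: empty frame pushed, potential unchanged
                have hgd : (PySem.Dict.mk graph).getD nb [] = [] := by
                  rw [PySem.Dict.getD_eq_get?_getD, hg]; rfl
                have h2 : Option.map (fun x => x.2)
                    (List.find? (fun p => p.1 == nb) graph) = none := hg
                have hfind : List.find? (fun p => p.1 == nb) graph = none := by
                  simpa using h2
                have hkeys : ∀ p ∈ graph, p.1 ≠ nb := by
                  intro p hp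
                  have := List.find?_eq_none.1 hfind p hp
                  simpa using this
                have hphi := pvPhiL_push_nonkey graph v nb hkeys
                simp only [pvM, List.map_cons, List.sum_cons, hgd] at hM ⊢
                simp at hM ⊢; omega
              · -- nb is a key: its list enters the stack, leaves the potential
                have hgd : (PySem.Dict.mk graph).getD nb [] = l := by
                  rw [PySem.Dict.getD_eq_get?_getD, hg]; rfl
                have hphi := pvPhiL_push_key graph v nb l (pvGet?_mem graph nb l hg) hv
                simp only [pvM, List.map_cons, List.sum_cons, hgd] at hM ⊢
                simp at hM ⊢; omega
            · intro fr hf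
              rcases List.mem_cons.1 hf with h | h
              · subst h; exact pvGetD_subset graph nb
              · rcases List.mem_cons.1 h with h' | h'
                · subst h'
                  exact fun x hx => hfr (a' + 1, nb :: frest) (by simp) (by simp [hx])
                · exact hfr fr (by simp [h'])

-- ===== VERDICT (by name: the statement is the Claim_ definition above) =====
theorem find_cycle_containing_spec : Claim_equal_find_cycle_containing := by
  intro graph name _
  unfold Spec_find_cycle_containing find_cycle_containing find_cycle_containing_alt
  by_cases h : (PySem.Dict.mk graph).contains name
  · simp only [h, if_true]
    rw [pvDfs_sim _ _ _ _ _ _ _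
      ⟨by simp [PySem.Set.empty], by simp [PySem.Set.empty], by simp, by simp⟩ (fun _ => rfl)]
    have hF : pvFuel graph
        = (graph.length + (graph.map (fun p => p.2.length)).sum + 1) + 1 := by
      unfold pvFuel; omega
    rw [hF]
    have hstep : pvDfsH (PySem.Dict.mk graph) name
        ((graph.length + (graph.map (fun p => p.2.length)).sum + 1) + 1) name
        PySem.Set.empty []
        = pvLoopH (pvDfsH (PySem.Dict.mk graph) name
            (graph.length + (graph.map (fun p => p.2.length)).sum + 1))
            ((PySem.Dict.mk graph).getD name []) [name] [name] := by
      simp [pvDfsH, PySem.Set.empty, PySem.Set.add, PySem.Set.contains]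
    rw [hstep]
    rw [show PySem.Set.ofList [name] = [name] from rfl]
    have hsim := pvSim graph name (pvStepFuel graph)
        [(graph.length + (graph.map (fun p => p.2.length)).sum + 1,
          (PySem.Dict.mk graph).getD name [])] [name] [name]
        (by
          have h1 := pvGetD_len_le graph name
          have h2 := pvPhiL_le graph [name]
          simp only [pvM, List.map_cons, List.map_nil, List.sum_cons, List.sum_nil,
            List.length_cons, List.length_nil]
          simp only [pvStepFuel]
          omega)
        (by simp)
        (by refine ⟨?_, trivial⟩; simp [pvFuel])
        (by simp) (by simp) (by simp) (by simp [pvU])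
        (by
          intro fr hf
          rcases List.mem_cons.1 hf with h' | h'
          · subst h'; exact pvGetD_subset graph name
          · simp at h')
    simp only [List.map_cons, List.map_nil] at hsim
    rw [hsim]
    rcases hr : pvLoopH
        (pvDfsH (PySem.Dict.mk graph) name
          (graph.length + (graph.map (fun p => p.2.length)).sum + 1))
        ((PySem.Dict.mk graph).getD name []) [name] [name] with ⟨r, v2⟩
    cases r <;> simp [pvRunH, hr]
  · simp [h]
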